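-- pv_equiv track=rewrite | github.com/Alexis99997777/ucb-lab9 | lab09/lab09.py | trade
-- ===== SOURCE A (Python) =====
-- def trade(first, second):
--     m, n = 1, 1
--     equal_prefix = lambda: (sum(first[:m]) == sum(second[:n]) and m <= len(first) and n<= len(second))
--     while not equal_prefix():
--         if m > len(first) or n > len(second):
--             return 'No Deal'
--         if sum(first[:m]) < sum(second[:n]):
--             m += 1
--         else:
--             n += 1
--     first[:m], second[:n] = second[:n], first[:m]
--     return 'Deal!'
-- ===== SOURCE B (Python) =====
-- def trade(first, second):
--     # Running prefix sums with two pointers; O(m+n) instead of re-summing prefixes.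
--     sa = first[0] if first else 0
--     sb = second[0] if second else 0
--     m, n = 1, 1
--     while m <= len(first) and n <= len(second):
--         if sa == sb:
--             first[:m], second[:n] = second[:n], first[:m]
--             return 'Deal!'
--         if sa < sb:
--             if m == len(first):
--                 break
--             sa += first[m]
--             m += 1
--         else:
--             if n == len(second):
--                 break
--             sb += second[n]
--             n += 1
--     return 'No Deal'
-- ===== Notes on version B (the rewrite author's own statement) =====
-- stated objective: faster
-- what changed: B keeps running prefix sums and updates them incrementally as the pointers advance, instead of re-summing both prefixes with sum(first[:m])/sum(second[:n]) on every loop iteration.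
import Mathlib
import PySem

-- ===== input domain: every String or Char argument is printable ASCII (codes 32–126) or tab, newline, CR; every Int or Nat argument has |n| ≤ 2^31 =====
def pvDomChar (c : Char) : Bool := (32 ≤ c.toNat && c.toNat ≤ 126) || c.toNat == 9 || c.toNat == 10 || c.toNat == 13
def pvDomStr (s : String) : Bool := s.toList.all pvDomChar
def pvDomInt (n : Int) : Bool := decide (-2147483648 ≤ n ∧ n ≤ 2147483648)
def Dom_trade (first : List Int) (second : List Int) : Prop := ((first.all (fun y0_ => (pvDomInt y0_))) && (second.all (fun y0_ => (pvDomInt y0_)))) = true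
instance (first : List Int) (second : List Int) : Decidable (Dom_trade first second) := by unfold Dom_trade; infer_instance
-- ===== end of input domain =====

-- B replaces A's per-iteration prefix re-summation by incrementally maintained running
-- prefix sums. Both A and B mutate the lists with the same prefix swap before returning
-- 'Deal!'; the equivalence proved here is about the return value.

-- ===== PORT A =====
-- A's while loop; m, n advance by 1 per iteration. The fuel first.length + second.length + 2
-- is a totality guard only: m + n grows by 1 per iteration and the loop exits before
-- m + n exceeds first.length + second.length + 2, so the 0-fuel branch is never reached
-- from trade's call.
def tradeLoop (first : List Int) (second : List Int) : Nat → Nat → Nat → String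
  | 0, _, _ => "No Deal"
  | fuel + 1, m, n =>
    if (first.take m).sum = (second.take n).sum ∧ m ≤ first.length ∧ n ≤ second.length then
      "Deal!"
    else if m > first.length ∨ n > second.length then
      "No Deal"
    else if (first.take m).sum < (second.take n).sum then
      tradeLoop first second fuel (m + 1) n
    else
      tradeLoop first second fuel m (n + 1)

def trade (first : List Int) (second : List Int) : String :=
  tradeLoop first second (first.length + second.length + 2) 1 1

-- ===== PORT B =====
-- B's while loop: sa, sb are the running sums of first[:m], second[:n]; same totality fuel.
-- first[m] / second[n] in Source B are only read when the index is strictly in range,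
-- so List.getD is exact here.
def tradeAltLoop (first : List Int) (second : List Int) : Nat → Int → Int → Nat → Nat → String
  | 0, _, _, _, _ => "No Deal"
  | fuel + 1, sa, sb, m, n =>
    if m ≤ first.length ∧ n ≤ second.length then
      if sa = sb then "Deal!"
      else if sa < sb then
        if m = first.length then "No Deal"
        else tradeAltLoop first second fuel (sa + first.getD m 0) sb (m + 1) n
      else
        if n = second.length then "No Deal"
        else tradeAltLoop first second fuel sa (sb + second.getD n 0) m (n + 1)
    else "No Deal"

def trade_alt (first : List Int) (second : List Int) : String :=
  tradeAltLoop first second (first.length + second.length + 2) (first.headD 0) (second.headD 0) 1 1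

-- ===== PRECONDITION & SPEC =====
def Spec_trade (first : List Int) (second : List Int) (out : String) : Prop := out = trade_alt first second
instance (first : List Int) (second : List Int) (out : String) : Decidable (Spec_trade first second out) := by unfold Spec_trade; infer_instance

-- ===== CLAIM (what is proved, stated in full; the proofs are below) =====
def Claim_equal_trade : Prop := ∀ (first : List Int) (second : List Int), Dom_trade first second → Spec_trade first second (trade first second)

-- ===== LEMMAS AND PROOFS =====

lemma take_succ_sum (l : List Int) (m : Nat) (h : m < l.length) :
    (l.take (m + 1)).sum = (l.take m).sum + l.getD m 0 := by
  rw [List.getD_eq_getElem l 0 h, List.sum_take_succ]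

lemma sum_take_headD (l : List Int) : (l.take 1).sum = l.headD 0 := by
  cases l <;> simp

lemma tradeLoop_out_of_range (first second : List Int) (fuel m n : Nat)
    (h : m > first.length ∨ n > second.length) :
    tradeLoop first second fuel m n = "No Deal" := by
  cases fuel with
  | zero => rfl
  | succ fuel =>
    rw [tradeLoop]
    have hne : ¬ ((first.take m).sum = (second.take n).sum ∧ m ≤ first.length ∧ n ≤ second.length) := by
      rcases h with h | h <;> (intro he; omega)
    rw [if_neg hne, if_pos h]

lemma tradeLoop_eq (first second : List Int) (fuel m n : Nat) :
    tradeLoop first second fuel m n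
      = tradeAltLoop first second fuel ((first.take m).sum) ((second.take n).sum) m n := by
  induction fuel generalizing m n with
  | zero => rfl
  | succ fuel ih =>
    rw [tradeLoop, tradeAltLoop]
    by_cases hb : m ≤ first.length ∧ n ≤ second.length
    · rw [if_pos hb]
      by_cases he : (first.take m).sum = (second.take n).sum
      · rw [if_pos ⟨he, hb⟩, if_pos he]
      · have hne : ¬ ((first.take m).sum = (second.take n).sum ∧ m ≤ first.length ∧ n ≤ second.length) := by
          intro hc; exact he hc.1
        have hrange : ¬ (m > first.length ∨ n > second.length) := by omega
        rw [if_neg hne, if_neg hrange, if_neg he]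
        by_cases hlt : (first.take m).sum < (second.take n).sum
        · rw [if_pos hlt, if_pos hlt]
          by_cases hml : m = first.length
          · rw [if_pos hml, tradeLoop_out_of_range first second fuel (m + 1) n (by omega)]
          · rw [if_neg hml, ih, take_succ_sum first m (by omega)]
        · rw [if_neg hlt, if_neg hlt]
          by_cases hnl : n = second.length
          · rw [if_pos hnl, tradeLoop_out_of_range first second fuel m (n + 1) (by omega)]
          · rw [if_neg hnl, ih, take_succ_sum second n (by omega)]
    · have hrange : m > first.length ∨ n > second.length := by omega
      have hne : ¬ ((first.take m).sum = (second.take n).sum ∧ m ≤ first.length ∧ n ≤ second.length) := by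
        intro hc; omega
      rw [if_neg hb, if_neg hne, if_pos hrange]

-- ===== VERDICT (by name: the statement is the Claim_ definition above) =====
theorem trade_spec : Claim_equal_trade := by
  intro first second _
  unfold Spec_trade trade trade_alt
  rw [tradeLoop_eq, sum_take_headD, sum_take_headD]
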